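-- pv_equiv track=rewrite | github.com/ktisha/python2012 | epifanov/typical_word_method.py | make_pattern_sets
-- ===== SOURCE A (Python) =====
-- def make_pattern_sets(frequent_words, cipher_words):
--     result = {}
--     for cipher_word in cipher_words:
--         set = {}
--         for frequent_word in frequent_words:
--             if match(frequent_word, cipher_word):
--                 set[frequent_word] = True
--         if len(set) > 0:
--             result[cipher_word] = set
--     return result
--
-- def match(w1, w2):
--     if len(w1) != len(w2):
--         return False;
--     for i in range(1, len(w1)):
--         for j in range (i):
--             if (w1[i] == w1[j]) != (w2[i] == w2[j]):
--                 return False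
--     return True
-- ===== SOURCE B (Python) =====
-- def make_pattern_sets(frequent_words, cipher_words):
--     index = {}
--     for w in frequent_words:
--         p = canon(w)
--         bucket = index.get(p, {})
--         bucket[w] = True
--         index[p] = bucket
--     result = {}
--     for c in cipher_words:
--         s = index.get(canon(c))
--         if s:
--             result[c] = s
--     return result
--
-- def canon(w):
--     return tuple(w.index(ch) for ch in w)
-- ===== Notes on version B (the rewrite author's own statement) =====
-- stated objective: faster
-- what changed: Instead of running the quadratic all-pairs repetition test for every (cipher word, frequent word) pair, B canonicalizes each word once to its first-occurrence index pattern and indexes the frequent words by pattern in a dict, so each cipher word is a single lookup.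
import Mathlib
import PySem

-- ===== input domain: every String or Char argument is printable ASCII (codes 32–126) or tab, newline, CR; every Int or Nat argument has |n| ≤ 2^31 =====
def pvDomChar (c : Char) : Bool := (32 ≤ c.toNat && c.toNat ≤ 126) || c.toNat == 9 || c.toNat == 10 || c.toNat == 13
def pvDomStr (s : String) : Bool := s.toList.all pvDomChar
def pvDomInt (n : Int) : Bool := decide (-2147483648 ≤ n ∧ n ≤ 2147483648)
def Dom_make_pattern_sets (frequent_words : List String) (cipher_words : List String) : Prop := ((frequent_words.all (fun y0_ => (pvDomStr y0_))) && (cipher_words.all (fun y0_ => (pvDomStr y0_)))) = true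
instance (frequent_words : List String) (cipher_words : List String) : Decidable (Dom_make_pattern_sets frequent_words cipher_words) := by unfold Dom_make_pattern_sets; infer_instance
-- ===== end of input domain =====

-- B replaces A's per-(cipher word, frequent word) all-pairs pattern test with a canonical
-- first-occurrence pattern per word plus a dict index of the frequent words by pattern (objective: faster).

-- ===== PORT A =====
-- match(w1, w2): the all-pairs repetition test.  Python's range(1, len) is ported as
-- List.range len: the extra i = 0 has an empty inner range, so the value is unchanged.
-- Indices i, j are always in range, so getD is exact.
def matchA (w1 w2 : String) : Bool :=
  let l1 := w1.toList
  let l2 := w2.toList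
  if l1.length ≠ l2.length then false
  else
    (List.range l1.length).all fun i =>
      (List.range i).all fun j =>
        ((l1.getD i ' ' == l1.getD j ' ') == (l2.getD i ' ' == l2.getD j ' '))

def make_pattern_sets (frequent_words : List String) (cipher_words : List String) :
    List (String × List (String × Bool)) :=
  let result : PySem.Dict String (PySem.Dict String Bool) :=
    cipher_words.foldl (fun result cipher_word =>
      let s : PySem.Dict String Bool :=
        frequent_words.foldl (fun s frequent_word =>
          if matchA frequent_word cipher_word then s.insert frequent_word true else s)
          PySem.Dict.empty
      if s.size > 0 then result.insert cipher_word s else result)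
      PySem.Dict.empty
  result.items.map (fun p => (p.1, p.2.items))


-- ===== PORT B =====
-- canon(w) = tuple(w.index(ch) for ch in w); ch always occurs in w, so str.index = List.idxOf (exact).
def canonB (w : String) : List Nat :=
  let l := w.toList
  l.map (fun c => l.idxOf c)

def make_pattern_sets_alt (frequent_words : List String) (cipher_words : List String) :
    List (String × List (String × Bool)) :=
  let index : PySem.Dict (List Nat) (PySem.Dict String Bool) :=
    frequent_words.foldl (fun index w =>
      let p := canonB w
      let bucket := index.getD p PySem.Dict.empty
      index.insert p (bucket.insert w true))
      PySem.Dict.empty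
  let result : PySem.Dict String (PySem.Dict String Bool) :=
    cipher_words.foldl (fun result c =>
      match index.get? (canonB c) with
      | some s => if s.size > 0 then result.insert c s else result
      | none => result)
      PySem.Dict.empty
  result.items.map (fun p => (p.1, p.2.items))


-- ===== PRECONDITION & SPEC =====
def Spec_make_pattern_sets (frequent_words : List String) (cipher_words : List String) (out : List (String × List (String × Bool))) : Prop := out = make_pattern_sets_alt frequent_words cipher_words
instance (frequent_words : List String) (cipher_words : List String) (out : List (String × List (String × Bool))) : Decidable (Spec_make_pattern_sets frequent_words cipher_words out) := by unfold Spec_make_pattern_sets; infer_instance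

-- ===== CLAIM (what is proved, stated in full; the proofs are below) =====
def Claim_equal_make_pattern_sets : Prop := ∀ (frequent_words : List String) (cipher_words : List String), Dom_make_pattern_sets frequent_words cipher_words → Spec_make_pattern_sets frequent_words cipher_words (make_pattern_sets frequent_words cipher_words)

-- ===== LEMMAS AND PROOFS =====

theorem idxOf_min {l : List Char} {a : Char} {j : Nat} (hj : j < l.length)
    (h : l[j] = a) : l.idxOf a ≤ j := by
  induction l generalizing j with
  | nil => simp at hj
  | cons x xs ih =>
    rcases j with _ | j
    · simp at h; simp [h]
    · simp only [List.idxOf_cons]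
      cases hx : (x == a) with
      | true => simp
      | false =>
        have := ih (j := j) (by simpa using hj) (by simpa using h)
        simp [this]

theorem canon_eq_iff {l : List Char} {i j : Nat} (hi : i < l.length) (hj : j < l.length) :
    (l.idxOf l[i] = l.idxOf l[j]) ↔ l[i] = l[j] := by
  constructor
  · intro h
    have e1 := List.getElem_idxOf (xs := l) (x := l[i])
      (List.idxOf_lt_length_of_mem (List.getElem_mem hi))
    have e2 := List.getElem_idxOf (xs := l) (x := l[j])
      (List.idxOf_lt_length_of_mem (List.getElem_mem hj))
    rw [← e1, ← e2]
    congr 1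
  · intro h; rw [h]

theorem key_iff (l1 l2 : List Char) (hlen : l1.length = l2.length) :
    ((∀ i < l1.length, ∀ j < i,
        ((l1.getD i ' ' == l1.getD j ' ') == (l2.getD i ' ' == l2.getD j ' ')) = true)
      ↔ l1.map (fun c => l1.idxOf c) = l2.map (fun c => l2.idxOf c)) := by
  constructor
  · intro T
    apply List.ext_getElem (by simp [hlen])
    intro i h1 h2
    simp only [List.length_map] at h1 h2
    have h1' : i < l1.length := h1
    have h2' : i < l2.length := h2
    clear h1 h2
    simp only [List.getElem_map]
    have pair : ∀ k (_hk : k < i), (l1[i]'h1' = l1[k]'(by omega) ↔ l2[i]'h2' = l2[k]'(by omega)) := by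
      intro k hk
      have := T i h1' k hk
      rw [List.getD_eq_getElem l1 ' ' h1', List.getD_eq_getElem l1 ' ' (by omega),
          List.getD_eq_getElem l2 ' ' h2', List.getD_eq_getElem l2 ' ' (by omega)] at this
      simpa [decide_eq_decide] using this
    set k1 := l1.idxOf (l1[i]'h1') with hk1
    set k2 := l2.idxOf (l2[i]'h2') with hk2
    have hk1i : k1 ≤ i := idxOf_min h1' rfl
    have hk2i : k2 ≤ i := idxOf_min h2' rfl
    have g1 : l1[k1]'(by omega) = l1[i]'h1' :=
      List.getElem_idxOf (List.idxOf_lt_length_of_mem (List.getElem_mem h1'))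
    have g2 : l2[k2]'(by omega) = l2[i]'h2' :=
      List.getElem_idxOf (List.idxOf_lt_length_of_mem (List.getElem_mem h2'))
    have le12 : k2 ≤ k1 := by
      rcases Nat.lt_or_ge k1 i with hlt | hge
      · have : l2[i]'h2' = l2[k1]'(by omega) := (pair k1 hlt).mp g1.symm
        exact idxOf_min (by omega) this.symm
      · omega
    have le21 : k1 ≤ k2 := by
      rcases Nat.lt_or_ge k2 i with hlt | hge
      · have : l1[i]'h1' = l1[k2]'(by omega) := (pair k2 hlt).mpr g2.symm
        exact idxOf_min (by omega) this.symm
      · omega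
    omega
  · intro hc i hi j hj
    have hi2 : i < l2.length := by omega
    have hj1 : j < l1.length := by omega
    have hj2 : j < l2.length := by omega
    have hidx : ∀ k, (hk : k < l1.length) →
        l1.idxOf (l1[k]'hk) = l2.idxOf (l2[k]'(by omega)) := by
      intro k hk
      have := congrArg (fun t => t[k]?) hc
      simp only [List.getElem?_map] at this
      rw [List.getElem?_eq_getElem hk, List.getElem?_eq_getElem (by omega : k < l2.length)] at this
      simpa using this
    rw [List.getD_eq_getElem l1 ' ' hi, List.getD_eq_getElem l1 ' ' hj1,
        List.getD_eq_getElem l2 ' ' hi2, List.getD_eq_getElem l2 ' ' hj2]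
    have h3 : (l1[i]'hi = l1[j]'hj1) ↔ (l2[i]'hi2 = l2[j]'hj2) :=
      ((canon_eq_iff hi hj1).symm.trans
        (by rw [hidx i hi, hidx j hj1])).trans (canon_eq_iff hi2 hj2)
    simp [decide_eq_decide, h3]

theorem matchA_eq_canon (w1 w2 : String) :
    matchA w1 w2 = decide (canonB w1 = canonB w2) := by
  by_cases hlen : w1.toList.length = w2.toList.length
  · have h := key_iff w1.toList w2.toList hlen
    simp only [matchA, canonB, if_neg (by simp [hlen] : ¬ w1.toList.length ≠ w2.toList.length)]
    rw [Bool.eq_iff_iff]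
    simp only [List.all_eq_true, List.mem_range, decide_eq_true_eq]
    exact h
  · have hc : ¬ canonB w1 = canonB w2 := by
      intro h
      exact hlen (by simpa [canonB] using congrArg List.length h)
    simp only [matchA]
    rw [if_pos hlen]
    simp [hc]

theorem get?_eq_ite {κ ν : Type} [BEq κ] [LawfulBEq κ] (d : PySem.Dict κ ν) (p : κ) (d0 : ν) :
    d.get? p = if d.contains p then some (d.getD p d0) else none := by
  rw [PySem.Dict.contains_eq_isSome_get?, PySem.Dict.getD_eq_get?_getD]
  cases h : d.get? p <;> simp [h]

theorem idx_get? (fw : List String) (idx : PySem.Dict (List Nat) (PySem.Dict String Bool))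
    (p : List Nat) :
    (fw.foldl (fun index w =>
        index.insert (canonB w) ((index.getD (canonB w) PySem.Dict.empty).insert w true)) idx).get? p
    = if (idx.contains p || fw.any (fun w => decide (canonB w = p))) then
        some ((fw.filter (fun w => decide (canonB w = p))).foldl
          (fun b w => b.insert w true) (idx.getD p PySem.Dict.empty))
      else none := by
  induction fw generalizing idx with
  | nil => simp [get?_eq_ite idx p PySem.Dict.empty]
  | cons w ws ih =>
    simp only [List.foldl_cons, List.any_cons, List.filter_cons]
    rw [ih]
    by_cases hp : canonB w = p
    · subst hp
      simp [PySem.Dict.contains_insert, PySem.Dict.getD_insert]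
    · rw [PySem.Dict.contains_insert, PySem.Dict.getD_insert]
      simp [hp, Ne.symm hp]

theorem foldl_congr' {α β : Type} (l : List β) (f g : α → β → α) (a : α)
    (h : ∀ acc x, f acc x = g acc x) : l.foldl f a = l.foldl g a := by
  induction l generalizing a with
  | nil => rfl
  | cons x xs ih => simp only [List.foldl_cons, h, ih]

theorem step_eq (fw : List String) (res : PySem.Dict String (PySem.Dict String Bool)) (c : String) :
    (let s := fw.foldl (fun s f => if matchA f c then s.insert f true else s) PySem.Dict.empty;
     if s.size > 0 then res.insert c s else res)
    = match (fw.foldl (fun index w =>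
          index.insert (canonB w) ((index.getD (canonB w) PySem.Dict.empty).insert w true))
          PySem.Dict.empty).get? (canonB c) with
      | some s => if s.size > 0 then res.insert c s else res
      | none => res := by
  rw [idx_get?]
  simp only [PySem.Dict.contains_empty, Bool.false_or, PySem.Dict.getD_empty]
  have hA : fw.foldl (fun s f => if matchA f c then s.insert f true else s) PySem.Dict.empty
      = (fw.filter (fun w => decide (canonB w = canonB c))).foldl
          (fun b w => b.insert w true) PySem.Dict.empty := by
    rw [List.foldl_filter]
    exact foldl_congr' _ _ _ _ (fun acc x => by rw [matchA_eq_canon])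
  simp only [hA]
  by_cases hany : (fw.any fun w => decide (canonB w = canonB c)) = true
  · simp only [hany, if_true]
  · have hfil : fw.filter (fun w => decide (canonB w = canonB c)) = [] := by
      rw [List.filter_eq_nil_iff]
      intro a ha
      have := (List.any_eq_true (l := fw)).not.mp hany
      push_neg at this
      simpa using this a ha
    simp [hany, hfil]

theorem final (frequent_words cipher_words : List String) :
    make_pattern_sets frequent_words cipher_words = make_pattern_sets_alt frequent_words cipher_words := by
  have h : List.foldl (fun result cipher_word =>
        let s := List.foldl (fun s frequent_word =>
          if matchA frequent_word cipher_word then s.insert frequent_word true else s)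
          PySem.Dict.empty frequent_words
        if s.size > 0 then result.insert cipher_word s else result) PySem.Dict.empty cipher_words
      = List.foldl (fun result c =>
          match (List.foldl (fun index w =>
              index.insert (canonB w) ((index.getD (canonB w) PySem.Dict.empty).insert w true))
              PySem.Dict.empty frequent_words).get? (canonB c) with
          | some s => if s.size > 0 then result.insert c s else result
          | none => result) PySem.Dict.empty cipher_words :=
    foldl_congr' _ _ _ _ (fun acc c => step_eq frequent_words acc c)
  exact congrArg (fun d => List.map (fun p => (p.1, p.2.items)) d.items) h

-- ===== VERDICT (by name: the statement is the Claim_ definition above) =====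
theorem make_pattern_sets_spec : Claim_equal_make_pattern_sets := by
  intro frequent_words cipher_words _
  unfold Spec_make_pattern_sets
  exact final frequent_words cipher_words
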